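-- pv_equiv track=rewrite | github.com/msobanjo/courseware | automation/newline_headings.py | get_formatted_file
-- ===== SOURCE A (Python) =====
-- def get_formatted_file(lines):
--     code_lines = []
--     code_block = False
--     for index, line in enumerate(lines):
--         if code_block:
--             if line.startswith("```"):
--                 code_block = False
--             code_lines.append(index)
--             continue
--         if line.startswith("```"):
--             code_block = True
--             code_lines.append(index)
--
--     previous_line = ""
--     newlines_to_add = []
--     for index, line in enumerate(lines):
--         if index in code_lines:
--             previous_line = line
--             continue
--         if line.startswith("#") and previous_line != "\n" and index != 0:
--             newlines_to_add.append(index)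
--         previous_line = line
--
--     for newline in newlines_to_add:
--         lines[newline] = "\n" + lines[newline]
--
--     return "".join(lines)
-- ===== SOURCE B (Python) =====
-- def get_formatted_file(lines):
--     # Single pass: fence state machine + previous_line in one loop,
--     # mutating lines in place at the current index (same side effect as A).
--     code_block = False
--     previous_line = ""
--     for index, line in enumerate(lines):
--         if code_block:
--             if line.startswith("```"):
--                 code_block = False
--             previous_line = line
--             continue
--         if line.startswith("```"):
--             code_block = True
--             previous_line = line
--             continue
--         if line.startswith("#") and previous_line != "\n" and index != 0:
--             lines[index] = "\n" + line
--         previous_line = line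
--     return "".join(lines)
-- ===== Notes on version B (the rewrite author's own statement) =====
-- stated objective: simpler
-- what changed: Replaced A's three passes (collect code-line indices, scan with an 'index in code_lines' membership test per line, then a patch pass over collected indices) by one fused loop that carries the fence state and previous_line and prepends the newline at the current index immediately.
import Mathlib
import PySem

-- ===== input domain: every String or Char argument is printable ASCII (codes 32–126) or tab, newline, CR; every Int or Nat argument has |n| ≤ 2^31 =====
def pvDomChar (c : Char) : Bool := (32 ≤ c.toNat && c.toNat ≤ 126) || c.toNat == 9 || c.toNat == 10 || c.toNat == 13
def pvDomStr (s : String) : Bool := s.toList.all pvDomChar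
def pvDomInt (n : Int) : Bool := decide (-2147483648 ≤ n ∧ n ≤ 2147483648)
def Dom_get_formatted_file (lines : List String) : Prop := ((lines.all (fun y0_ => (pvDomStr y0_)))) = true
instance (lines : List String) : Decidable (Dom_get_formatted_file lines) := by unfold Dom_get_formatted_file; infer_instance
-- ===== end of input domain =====

-- B fuses A's three passes (fence scan, membership-tested heading scan, patch pass) into one
-- loop carrying the fence state and previous line; A also mutates `lines` in place and B performs
-- the same mutation (the Lean ports are pure, so the theorem is about the return value).


-- ===== PORT A =====
-- first loop: builds code_lines (indices inside/at code fences) and the final code_block flag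
def pvFenceLoop : List (Int × String) → List Int × Bool → List Int × Bool
  | [], st => st
  | (i, l) :: rest, (cls, cb) =>
    if cb then
      pvFenceLoop rest (cls ++ [i], if PySem.Str.startswith l "```" = true then false else cb)
    else if PySem.Str.startswith l "```" = true then
      pvFenceLoop rest (cls ++ [i], true)
    else
      pvFenceLoop rest (cls, cb)

-- second loop: collects newlines_to_add, testing `index in code_lines` on the full list
def pvScanLoop : List (Int × String) → List Int → String → List Int → List Int
  | [], _, _, acc => acc
  | (i, l) :: rest, cls, prev, acc =>
    if i ∈ cls then
      pvScanLoop rest cls l acc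
    else if PySem.Str.startswith l "#" = true ∧ prev ≠ "\n" ∧ i ≠ 0 then
      pvScanLoop rest cls l (acc ++ [i])
    else
      pvScanLoop rest cls l acc

def get_formatted_file (lines : List String) : String :=
  let code_lines := (pvFenceLoop (PySem.List.enumerate lines 0) ([], false)).1
  let newlines_to_add := pvScanLoop (PySem.List.enumerate lines 0) code_lines "" []
  let lines' := newlines_to_add.foldl
    (fun ls n => PySem.List.pySetD ls n ("\n" ++ PySem.List.pyGetD ls n "")) lines
  PySem.Str.join "" lines'

-- ===== PORT B =====
-- single loop over (index, line): fence state + previous_line; emits the (possibly patched) line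
def pvAltGo : List String → Int → Bool → String → List String
  | [], _, _, _ => []
  | l :: rest, i, cb, prev =>
    if cb then
      l :: pvAltGo rest (i + 1) (if PySem.Str.startswith l "```" = true then false else cb) l
    else if PySem.Str.startswith l "```" = true then
      l :: pvAltGo rest (i + 1) true l
    else if PySem.Str.startswith l "#" = true ∧ prev ≠ "\n" ∧ i ≠ 0 then
      ("\n" ++ l) :: pvAltGo rest (i + 1) cb l
    else
      l :: pvAltGo rest (i + 1) cb l

def get_formatted_file_alt (lines : List String) : String :=
  PySem.Str.join "" (pvAltGo lines 0 false "")

-- ===== PRECONDITION & SPEC =====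
def Spec_get_formatted_file (lines : List String) (out : String) : Prop := out = get_formatted_file_alt lines
instance (lines : List String) (out : String) : Decidable (Spec_get_formatted_file lines out) := by unfold Spec_get_formatted_file; infer_instance

-- ===== CLAIM (what is proved, stated in full; the proofs are below) =====
def Claim_equal_get_formatted_file : Prop := ∀ (lines : List String), Dom_get_formatted_file lines → Spec_get_formatted_file lines (get_formatted_file lines)

-- ===== LEMMAS AND PROOFS =====

-- indices of code lines, computed incrementally from start index s and fence state cb
def pvCodeIdx : List String → Int → Bool → List Int
  | [], _, _ => []
  | l :: rest, s, cb =>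
    if cb then s :: pvCodeIdx rest (s + 1) (if PySem.Str.startswith l "```" = true then false else cb)
    else if PySem.Str.startswith l "```" = true then s :: pvCodeIdx rest (s + 1) true
    else pvCodeIdx rest (s + 1) cb

-- indices that receive a "\n" prefix, computed incrementally
def pvMarks : List String → Int → Bool → String → List Int
  | [], _, _, _ => []
  | l :: rest, s, cb, prev =>
    if cb then pvMarks rest (s + 1) (if PySem.Str.startswith l "```" = true then false else cb) l
    else if PySem.Str.startswith l "```" = true then pvMarks rest (s + 1) true l
    else if PySem.Str.startswith l "#" = true ∧ prev ≠ "\n" ∧ s ≠ 0 then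
      s :: pvMarks rest (s + 1) cb l
    else pvMarks rest (s + 1) cb l

theorem pvCodeIdx_lb (ls : List String) (s : Int) (cb : Bool) :
    ∀ i ∈ pvCodeIdx ls s cb, s ≤ i := by
  induction ls generalizing s cb with
  | nil => simp [pvCodeIdx]
  | cons l rest ih =>
    intro i hi
    simp only [pvCodeIdx] at hi
    split_ifs at hi with h1 h2 <;>
      first
        | (rcases List.mem_cons.mp hi with h | h
           · omega
           · have := ih _ _ _ h; omega)
        | (have := ih _ _ _ hi; omega)

theorem pvMarks_lb (ls : List String) (s : Int) (cb : Bool) (prev : String) :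
    ∀ i ∈ pvMarks ls s cb prev, s ≤ i := by
  induction ls generalizing s cb prev with
  | nil => simp [pvMarks]
  | cons l rest ih =>
    intro i hi
    simp only [pvMarks] at hi
    split_ifs at hi with h1 h2 h3 <;>
      first
        | (rcases List.mem_cons.mp hi with h | h
           · omega
           · have := ih _ _ _ _ h; omega)
        | (have := ih _ _ _ _ hi; omega)

theorem pvMarks_ub (ls : List String) (s : Int) (cb : Bool) (prev : String) :
    ∀ i ∈ pvMarks ls s cb prev, i < s + ls.length := by
  induction ls generalizing s cb prev with
  | nil => simp [pvMarks]
  | cons l rest ih =>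
    intro i hi
    simp only [pvMarks] at hi
    split_ifs at hi with h1 h2 h3 <;>
      first
        | (rcases List.mem_cons.mp hi with h | h
           · simp; omega
           · have := ih _ _ _ _ h; simp; omega)
        | (have := ih _ _ _ _ hi; simp; omega)

theorem pvMarks_pairwise (ls : List String) (s : Int) (cb : Bool) (prev : String) :
    (pvMarks ls s cb prev).Pairwise (· < ·) := by
  induction ls generalizing s cb prev with
  | nil => simp [pvMarks]
  | cons l rest ih =>
    simp only [pvMarks]
    split_ifs with h1 h2 h3 <;>
      first
        | exact List.Pairwise.cons (fun j hj => by have := pvMarks_lb _ _ _ _ _ hj; omega) (ih _ _ _)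
        | exact ih _ _ _

-- first loop computes acc ++ pvCodeIdx
theorem pvFenceLoop_eq (ls : List String) (s : Int) (acc : List Int) (cb : Bool) :
    (pvFenceLoop (PySem.List.enumerate ls s) (acc, cb)).1 = acc ++ pvCodeIdx ls s cb := by
  induction ls generalizing s acc cb with
  | nil => simp [PySem.List.enumerate_nil, pvFenceLoop, pvCodeIdx]
  | cons l rest ih =>
    rw [PySem.List.enumerate_cons]
    simp only [pvFenceLoop, pvCodeIdx]
    split_ifs with h1 h2 <;> simp [ih]

-- second loop computes acc ++ pvMarks, when the membership list is pre ++ pvCodeIdx with pre < s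
theorem pvScanLoop_eq (ls : List String) (s : Int) (cb : Bool) (prev : String)
    (acc : List Int) (pre : List Int) (hpre : ∀ j ∈ pre, j < s) :
    pvScanLoop (PySem.List.enumerate ls s) (pre ++ pvCodeIdx ls s cb) prev acc
      = acc ++ pvMarks ls s cb prev := by
  induction ls generalizing s cb prev acc pre with
  | nil => simp [PySem.List.enumerate_nil, pvScanLoop, pvCodeIdx, pvMarks]
  | cons l rest ih =>
    rw [PySem.List.enumerate_cons]
    simp only [pvScanLoop, pvCodeIdx, pvMarks]
    have hpre' : ∀ j ∈ pre ++ [s], j < s + 1 := by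
      intro j hj
      rcases List.mem_append.mp hj with h | h
      · have := hpre j h; omega
      · simp at h; omega
    have hpre1 : ∀ j ∈ pre, j < s + 1 := fun j hj => by have := hpre j hj; omega
    by_cases h1 : cb = true
    · subst h1
      simp only [if_true]
      rw [if_pos (show s ∈ pre ++ s :: pvCodeIdx rest (s + 1)
        (if PySem.Str.startswith l "```" = true then false else true) by simp)]
      rw [show pre ++ s :: pvCodeIdx rest (s + 1)
          (if PySem.Str.startswith l "```" = true then false else true)
        = (pre ++ [s]) ++ pvCodeIdx rest (s + 1)
          (if PySem.Str.startswith l "```" = true then false else true) by simp]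
      exact ih _ _ _ _ _ hpre'
    · simp only [Bool.not_eq_true] at h1
      subst h1
      simp only [Bool.false_eq_true, if_false]
      by_cases h2 : PySem.Str.startswith l "```" = true
      · rw [if_pos h2, if_pos h2]
        rw [if_pos (show s ∈ pre ++ s :: pvCodeIdx rest (s + 1) true by simp)]
        rw [show pre ++ s :: pvCodeIdx rest (s + 1) true
          = (pre ++ [s]) ++ pvCodeIdx rest (s + 1) true by simp]
        exact ih _ _ _ _ _ hpre'
      · rw [if_neg h2, if_neg h2]
        rw [if_neg (show s ∉ pre ++ pvCodeIdx rest (s + 1) false by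
          intro hc
          rcases List.mem_append.mp hc with h | h
          · have := hpre s h; omega
          · have := pvCodeIdx_lb _ _ _ _ h; omega)]
        by_cases h3 : PySem.Str.startswith l "#" = true ∧ prev ≠ "\n" ∧ s ≠ 0
        · rw [if_pos h3, if_pos h3, ih _ _ _ _ _ hpre1]
          simp
        · rw [if_neg h3, if_neg h3]
          exact ih _ _ _ _ _ hpre1

-- index-function congruence for the patch map
theorem pvPatch_congr (m : List Int) (f g : Nat → Int) (ls : List String) (h : ∀ k, f k = g k) :
    ls.mapIdx (fun k x => if f k ∈ m then "\n" ++ x else x)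
      = ls.mapIdx (fun k x => if g k ∈ m then "\n" ++ x else x) := by
  have hfg : f = g := funext h
  rw [hfg]

-- B's loop applies exactly the pvMarks patches (m may carry extra indices < s)
theorem pvAltGo_eq_marks (ls : List String) (s : Int) (cb : Bool) (prev : String)
    (m : List Int) (hm : ∀ i, s ≤ i → (i ∈ m ↔ i ∈ pvMarks ls s cb prev)) :
    pvAltGo ls s cb prev
      = ls.mapIdx (fun k l => if (s + (k : Int)) ∈ m then "\n" ++ l else l) := by
  induction ls generalizing s cb prev m with
  | nil => simp [pvAltGo]
  | cons l rest ih =>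
    simp only [pvAltGo, List.mapIdx_cons, Nat.cast_zero, add_zero]
    have tailm : ∀ i, s + 1 ≤ i →
        (i ∈ m ↔ i ∈ pvMarks (l :: rest) s cb prev) := fun i hi => hm i (by omega)
    by_cases h1 : cb = true
    · subst h1
      have hmk : pvMarks (l :: rest) s true prev
          = pvMarks rest (s + 1) (if PySem.Str.startswith l "```" = true then false else true) l := by
        simp only [pvMarks, if_true]
      have hs : s ∉ m := by
        intro hc
        have := (hm s le_rfl).mp hc
        rw [hmk] at this
        have := pvMarks_lb _ _ _ _ _ this; omega
      simp only [if_true]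
      rw [if_neg hs]
      rw [ih (s + 1) _ _ m (fun i hi => by rw [tailm i hi, hmk])]
      exact congrArg₂ List.cons rfl (pvPatch_congr m _ _ rest (fun k => by push_cast; ring))
    · simp only [Bool.not_eq_true] at h1
      subst h1
      simp only [Bool.false_eq_true, if_false]
      by_cases h2 : PySem.Str.startswith l "```" = true
      · have hmk : pvMarks (l :: rest) s false prev = pvMarks rest (s + 1) true l := by
          simp only [pvMarks, Bool.false_eq_true, if_false]
          rw [if_pos h2]
        have hs : s ∉ m := by
          intro hc
          have := (hm s le_rfl).mp hc
          rw [hmk] at this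
          have := pvMarks_lb _ _ _ _ _ this; omega
        rw [if_pos h2, if_neg hs]
        rw [ih (s + 1) _ _ m (fun i hi => by rw [tailm i hi, hmk])]
        exact congrArg₂ List.cons rfl (pvPatch_congr m _ _ rest (fun k => by push_cast; ring))
      · rw [if_neg h2]
        by_cases h3 : PySem.Str.startswith l "#" = true ∧ prev ≠ "\n" ∧ s ≠ 0
        · have hmk : pvMarks (l :: rest) s false prev = s :: pvMarks rest (s + 1) false l := by
            simp only [pvMarks, Bool.false_eq_true, if_false]
            rw [if_neg h2, if_pos h3]
          have hs : s ∈ m := by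
            rw [hm s le_rfl, hmk]
            exact List.mem_cons_self
          rw [if_pos h3, if_pos hs]
          rw [ih (s + 1) _ _ m (fun i hi => by
            rw [tailm i hi, hmk, List.mem_cons]
            constructor
            · rintro (h | h)
              · omega
              · exact h
            · intro h; exact Or.inr h)]
          exact congrArg₂ List.cons rfl (pvPatch_congr m _ _ rest (fun k => by push_cast; ring))
        · have hmk : pvMarks (l :: rest) s false prev = pvMarks rest (s + 1) false l := by
            simp only [pvMarks, Bool.false_eq_true, if_false]
            rw [if_neg h2, if_neg h3]
          have hs : s ∉ m := by
            intro hc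
            have := (hm s le_rfl).mp hc
            rw [hmk] at this
            have := pvMarks_lb _ _ _ _ _ this; omega
          rw [if_neg h3, if_neg hs]
          rw [ih (s + 1) _ _ m (fun i hi => by rw [tailm i hi, hmk])]
          exact congrArg₂ List.cons rfl (pvPatch_congr m _ _ rest (fun k => by push_cast; ring))

-- identity patch map
theorem pvMapIdx_id (xs : List String) : xs.mapIdx (fun _ l => l) = xs := by
  induction xs with
  | nil => rfl
  | cons x t iht => rw [List.mapIdx_cons]; exact congrArg₂ List.cons rfl iht

-- A's patch pass applies the same patches (for sorted, in-range index lists)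
theorem pvFoldlPatch_eq (m : List Int) (xs : List String)
    (hm : ∀ i ∈ m, 0 ≤ i ∧ i < xs.length) (hp : m.Pairwise (· < ·)) :
    m.foldl (fun ls n => PySem.List.pySetD ls n ("\n" ++ PySem.List.pyGetD ls n "")) xs
      = xs.mapIdx (fun k l => if ((k : Int)) ∈ m then "\n" ++ l else l) := by
  induction m generalizing xs with
  | nil =>
    simp only [List.foldl_nil, List.not_mem_nil, if_false]
    exact (pvMapIdx_id xs).symm
  | cons n rest ih =>
    simp only [List.foldl_cons]
    have hn0 : 0 ≤ n := (hm n (by simp)).1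
    have hnl : n < (xs.length : Int) := by exact_mod_cast (hm n (by simp)).2
    have hnlt : n.toNat < xs.length := by omega
    have hset : PySem.List.pySetD xs n ("\n" ++ PySem.List.pyGetD xs n "")
        = xs.set n.toNat ("\n" ++ xs[n.toNat]) := by
      rw [PySem.List.pySetD_of_nonneg xs _ hn0,
        PySem.List.pyGetD_eq_getElem xs "" hn0 (by exact_mod_cast hnl)]
    rw [hset, ih (xs.set n.toNat ("\n" ++ xs[n.toNat]))
      (by
        intro i hi
        have := hm i (by simp [hi])
        simpa using this)
      (List.Pairwise.sublist (List.sublist_cons_self _ _) hp)]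
    apply List.ext_getElem
    · simp
    · intro k hk1 hk2
      simp only [List.getElem_mapIdx, List.getElem_set]
      have hrest_gt : ∀ j ∈ rest, n < j := fun j hj => (List.pairwise_cons.mp hp).1 j hj
      by_cases hkn : k = n.toNat
      · have hknr : (k : Int) ∉ rest := by
          intro hc; have := hrest_gt _ hc; omega
        rw [if_pos (show n.toNat = k from hkn.symm), if_neg hknr,
          if_pos (show (k : Int) ∈ n :: rest by
            simp only [List.mem_cons]; left; omega)]
        simp [hkn]
      · rw [if_neg (show ¬ (n.toNat = k) from fun h => hkn h.symm)]
        have hmem : ((k : Int) ∈ rest) ↔ ((k : Int) ∈ n :: rest) := by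
          rw [List.mem_cons]
          constructor
          · intro h; exact Or.inr h
          · rintro (h | h)
            · omega
            · exact h
        by_cases hk : (k : Int) ∈ rest
        · rw [if_pos hk, if_pos (hmem.mp hk)]
        · rw [if_neg hk, if_neg (fun h => hk (hmem.mpr h))]

theorem pvLists_eq (lines : List String) :
    ((pvScanLoop (PySem.List.enumerate lines 0)
        (pvFenceLoop (PySem.List.enumerate lines 0) ([], false)).1 "" []).foldl
      (fun ls n => PySem.List.pySetD ls n ("\n" ++ PySem.List.pyGetD ls n "")) lines)
      = pvAltGo lines 0 false "" := by
  have hfence := pvFenceLoop_eq lines 0 [] false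
  have hscan := pvScanLoop_eq lines 0 false "" [] [] (by simp)
  rw [hfence]
  simp only [List.nil_append] at hscan ⊢
  rw [hscan]
  rw [pvFoldlPatch_eq (pvMarks lines 0 false "") lines
    (fun i hi => ⟨pvMarks_lb _ _ _ _ _ hi, by have := pvMarks_ub lines 0 false "" i hi; omega⟩)
    (pvMarks_pairwise _ _ _ _)]
  rw [pvAltGo_eq_marks lines 0 false "" (pvMarks lines 0 false "") (fun i _ => Iff.rfl)]
  simp

-- ===== VERDICT (by name: the statement is the Claim_ definition above) =====
theorem get_formatted_file_spec : Claim_equal_get_formatted_file := by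
  intro lines _
  unfold Spec_get_formatted_file get_formatted_file get_formatted_file_alt
  exact congrArg (PySem.Str.join "") (pvLists_eq lines)
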